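-- pv_equiv track=rewrite | github.com/AtheeshRathnaweera/Leetcode_Practice | 1992.py | preProcessing
-- ===== SOURCE A (Python) =====
-- from typing import List
--
-- def preProcessing(land: List[List[int]]) -> List[List[int]]:
--     """
--     This function identifies adjacent farmlands in each row and returns their coordinates.
--     """
--     adj_farms_in_row = []
--
--     for row_index, row in enumerate(land):
--         adj_groups = []
--         current_group = []
--
--         for col_index, elem in enumerate(row):
--             if elem == 1:
--                 current_group.append((row_index, col_index))
--                 continue
--
--             if len(current_group) > 0:
--                 adj_groups.append(current_group)
--
--             current_group = []
--
--         if len(current_group) > 0: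
--             adj_groups.append(current_group)
--
--         adj_farms_in_row.append(adj_groups)
--
--     return adj_farms_in_row
-- ===== SOURCE B (Python) =====
-- from typing import List
--
-- def preProcessing(land: List[List[int]]) -> List[List[int]]:
--     out = []
--     for ri, row in enumerate(land):
--         f = [v == 1 for v in row]
--         starts = [c for c, (a, b) in enumerate(zip([False] + f, f)) if b and not a]
--         ends = [c for c, (a, b) in enumerate(zip(f, f[1:] + [False])) if a and not b]
--         out.append([[(ri, c) for c in range(s, e + 1)] for s, e in zip(starts, ends)])
--     return out
-- ===== Notes on version B (the rewrite author's own statement) =====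
-- stated objective: alternative
-- what changed: Replaces A's sequential accumulator scan by a staged boundary-detection formulation: per row it computes a boolean mask, derives run-start and run-end column lists from zips of the mask with its shifts, then zips starts with ends and materializes each group as range(s, e+1) tuples.
import Mathlib
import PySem

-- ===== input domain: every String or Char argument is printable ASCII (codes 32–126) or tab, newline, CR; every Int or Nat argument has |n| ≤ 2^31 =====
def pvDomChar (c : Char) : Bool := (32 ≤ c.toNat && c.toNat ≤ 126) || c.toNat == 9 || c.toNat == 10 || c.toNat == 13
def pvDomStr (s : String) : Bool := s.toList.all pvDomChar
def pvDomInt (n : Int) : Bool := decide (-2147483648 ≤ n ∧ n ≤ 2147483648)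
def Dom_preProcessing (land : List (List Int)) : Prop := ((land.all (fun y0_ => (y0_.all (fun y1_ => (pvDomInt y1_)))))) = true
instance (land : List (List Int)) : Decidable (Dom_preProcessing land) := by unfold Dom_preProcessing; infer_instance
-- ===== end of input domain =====

-- B replaces A's sequential current_group accumulator by a staged boundary-detection
-- formulation: per row a boolean mask, run-start/run-end column lists from zips of the
-- mask with its shifts, then zip(starts, ends) materialized as ranges (objective: alternative).

-- ===== PORT A =====
-- A's inner loop over enumerate(row): state = (adj_groups, current_group)
def loopA (ri : Int) : List (Int × Int) → List (List (Int × Int)) → List (Int × Int) → List (List (Int × Int))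
  | [], groups, cur => if cur.length > 0 then groups ++ [cur] else groups
  | p :: rest, groups, cur =>
    if p.2 = 1 then loopA ri rest groups (cur ++ [(ri, p.1)])
    else loopA ri rest (if cur.length > 0 then groups ++ [cur] else groups) []

def preProcessing (land : List (List Int)) : List (List (List (Int × Int))) :=
  (PySem.List.enumerate land).foldl
    (fun acc q => acc ++ [loopA q.1 (PySem.List.enumerate q.2) [] []]) []

-- ===== PORT B =====
-- f = [v == 1 for v in row]
def flagsB (row : List Int) : List Bool := row.map (fun v => v == 1)

-- starts = [c for c, (a, b) in enumerate(zip([False] + f, f)) if b and not a]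
def startsB (f : List Bool) : List Int :=
  ((PySem.List.enumerate ((false :: f).zip f)).filter (fun q => q.2.2 && !q.2.1)).map (·.1)

-- ends = [c for c, (a, b) in enumerate(zip(f, f[1:] + [False])) if a and not b]
def endsB (f : List Bool) : List Int :=
  ((PySem.List.enumerate (f.zip (PySem.List.slice f (some 1) none ++ [false]))).filter
      (fun q => q.2.1 && !q.2.2)).map (·.1)

-- [[(ri, c) for c in range(s, e + 1)] for s, e in zip(starts, ends)]
def rowBalt (ri : Int) (row : List Int) : List (List (Int × Int)) :=
  let f := flagsB row
  ((startsB f).zip (endsB f)).map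
    (fun se => (PySem.List.pyRange se.1 (se.2 + 1) 1).map (fun c => (ri, c)))

def preProcessing_alt (land : List (List Int)) : List (List (List (Int × Int))) :=
  (PySem.List.enumerate land).foldl (fun acc q => acc ++ [rowBalt q.1 q.2]) []

-- ===== PRECONDITION & SPEC =====
def Spec_preProcessing (land : List (List Int)) (out : List (List (List (Int × Int)))) : Prop := out = preProcessing_alt land
instance (land : List (List Int)) (out : List (List (List (Int × Int)))) : Decidable (Spec_preProcessing land out) := by unfold Spec_preProcessing; infer_instance

-- ===== CLAIM (what is proved, stated in full; the proofs are below) =====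
def Claim_equal_preProcessing : Prop := ∀ (land : List (List Int)), Dom_preProcessing land → Spec_preProcessing land (preProcessing land)

-- ===== LEMMAS AND PROOFS =====

-- pure start/end column lists over a flag list (p = previous flag, k = current column)
def pureS (p : Bool) (k : Int) : List Bool → List Int
  | [] => []
  | b :: r => (if b && !p then [k] else []) ++ pureS b (k + 1) r

def pureE (k : Int) : List Bool → List Int
  | [] => []
  | b :: r => (if b && !(r.headD false) then [k] else []) ++ pureE (k + 1) r

-- A's sequential grouping, on flags, producing column lists
def pureR (k : Int) (cur : List Int) : List Bool → List (List Int)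
  | [] => if cur = [] then [] else [cur]
  | b :: r => if b then pureR (k + 1) (cur ++ [k]) r
              else (if cur = [] then [] else [cur]) ++ pureR (k + 1) [] r

theorem startsB_eq (f : List Bool) : ∀ (p : Bool) (k : Int),
    ((PySem.List.enumerate ((p :: f).zip f) k).filter (fun q => q.2.2 && !q.2.1)).map (·.1)
      = pureS p k f := by
  induction f with
  | nil => intro p k; simp [pureS]
  | cons b r ih =>
    intro p k
    simp only [List.zip_cons_cons, PySem.List.enumerate_cons, List.filter_cons, pureS]
    by_cases h : (b && !p) = true <;> simp [h, ih b (k + 1)]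

theorem startsB_def (f : List Bool) : startsB f = pureS false 0 f := by
  simpa [startsB] using startsB_eq f false 0

theorem endsB_eq (f : List Bool) : ∀ (k : Int),
    ((PySem.List.enumerate (f.zip (f.drop 1 ++ [false])) k).filter
        (fun q => q.2.1 && !q.2.2)).map (·.1) = pureE k f := by
  induction f with
  | nil => intro k; simp [pureE]
  | cons b r ih =>
    intro k
    rcases r with _ | ⟨c, r'⟩
    · cases b <;> simp [pureE]
    · simp only [List.drop_succ_cons, List.drop_zero, List.cons_append,
        List.zip_cons_cons, PySem.List.enumerate_cons, List.filter_cons, pureE]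
      have := ih (k + 1)
      simp only [List.drop_succ_cons, List.drop_zero] at this
      by_cases h : (b && !c) = true <;> simp [h, this] <;> cases r' <;> simp [pureE]

theorem endsB_def (f : List Bool) : endsB f = pureE 0 f := by
  have : PySem.List.slice f (some 1) none = f.drop 1 := by
    simpa using PySem.List.slice_from_one f
  simpa [endsB, this] using endsB_eq f 0

-- A's loop equals pureR on the flag list (cur carried as columns)
theorem loopA_eq_pureR (ri : Int) (row : List Int) : ∀ (k : Int) (groups : List (List (Int × Int))) (curCols : List Int),
    loopA ri (PySem.List.enumerate row k) groups (curCols.map (fun c => (ri, c)))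
      = groups ++ (pureR k curCols (flagsB row)).map (List.map (fun c => (ri, c))) := by
  induction row with
  | nil =>
    intro k groups cur
    simp only [PySem.List.enumerate, loopA, flagsB, List.map_nil, pureR]
    rcases cur with _ | ⟨x, xs⟩ <;> simp
  | cons v rest ih =>
    intro k groups cur
    simp only [PySem.List.enumerate_cons, loopA, flagsB, List.map_cons, pureR]
    by_cases hv : v = 1
    · have : cur.map (fun c => (ri, c)) ++ [(ri, k)] = (cur ++ [k]).map (fun c => (ri, c)) := by simp
      simp only [hv, this, ih]
      simp [flagsB]
    · have hb : (v == 1) = false := by simpa using hv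
      have hnil : (cur.map (fun c => (ri, c)) = []) ↔ cur = [] := by simp
      rcases cur with _ | ⟨x, xs⟩
      · simp only [List.map_nil, List.length_nil, gt_iff_lt, lt_irrefl, if_false, hv, hb]
        have := ih (k + 1) groups ([] : List Int)
        simp only [List.map_nil] at this
        simp [this, flagsB]
      · simp only [hv, hb, List.map_cons, List.length_cons]
        have := ih (k + 1) (groups ++ [(x :: xs).map (fun c => (ri, c))]) ([] : List Int)
        simp only [List.map_nil, List.map_cons, List.append_assoc, List.singleton_append] at this
        simpa [flagsB] using this

-- main combinatorial fact: sequential grouping = zip of boundary lists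
theorem pureR_eq_zip (f : List Bool) :
    (∀ k : Int, pureR k [] f = ((pureS false k f).zip (pureE k f)).map
        (fun se => PySem.List.pyRange se.1 (se.2 + 1) 1))
  ∧ (∀ k s : Int, s < k → pureR k (PySem.List.pyRange s k 1) f
        = ((s :: pureS true k f).zip
            ((if f.headD false then [] else [k - 1]) ++ pureE k f)).map
          (fun se => PySem.List.pyRange se.1 (se.2 + 1) 1)) := by
  induction f with
  | nil =>
    refine ⟨fun k => by simp [pureR, pureS, pureE], fun k s hsk => ?_⟩
    have hne : PySem.List.pyRange s k 1 ≠ [] := by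
      intro h
      have := PySem.List.length_pyRange_one s k
      rw [h] at this; simp at this; omega
    simp [pureR, pureS, pureE, hne]
  | cons b r ih =>
    constructor
    · intro k
      simp only [pureR, pureS, pureE]
      rcases b with _ | _
      · simp [ih.1 (k + 1)]
      · have h2 := ih.2 (k + 1) k (by omega)
        simp only [add_sub_cancel_right] at h2
        cases hr : r.head?.getD false <;> simp [hr] at h2 <;> simp [h2, hr]
    · intro k s hsk
      have hne : PySem.List.pyRange s k 1 ≠ [] := by
        intro h
        have := PySem.List.length_pyRange_one s k
        rw [h] at this; simp at this; omega
      simp only [pureR, pureS, pureE]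
      rcases b with _ | _
      · simp [hne, ih.1 (k + 1)]
      · have hext : PySem.List.pyRange s k 1 ++ [k] = PySem.List.pyRange s (k + 1) 1 :=
          (PySem.List.pyRange_one_succ_right (by omega)).symm
        have h2 := ih.2 (k + 1) s (by omega)
        simp only [add_sub_cancel_right] at h2
        cases hr : r.head?.getD false <;> simp [hr] at h2 <;> simp [hext, h2, hr]

theorem loopA_eq_rowBalt (ri : Int) (row : List Int) :
    loopA ri (PySem.List.enumerate row) [] [] = rowBalt ri row := by
  have h := loopA_eq_pureR ri row 0 [] []
  simp only [List.map_nil, List.nil_append] at h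
  rw [h, (pureR_eq_zip (flagsB row)).1 0]
  simp [rowBalt, startsB_def, endsB_def, List.map_map, ]

-- ===== VERDICT (by name: the statement is the Claim_ definition above) =====
theorem preProcessing_spec : Claim_equal_preProcessing := by
  intro land _
  unfold Spec_preProcessing preProcessing preProcessing_alt
  simp [loopA_eq_rowBalt]
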